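-- pv_equiv track=rewrite | github.com/michaelkearse/uORF_Half-life | calculate_uorfs.py | calculate_uorfs
-- ===== SOURCE A (Python) =====
-- def calculate_uorfs(seq, cds_start_pos):
--     is_uorf = [False, False, False] # each index represents one of the 3 diffrent reading frames
--     uorf_codons = 0
--
--     in_cds = False
--     index = 0
--     # while the current postion is not in the cds region or one of the current reading frames is still in the middle of a uorf
--     while index < len(seq) - 2 and (not in_cds or is_uorf[0] or is_uorf[1] or is_uorf[2]):
--         frame = index % 3 # calculate current reading frame
--
--         # check to see if the current codon in the current reading is start codon and that the current codon is in the cds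
--         if seq[index] == 'A' and seq[index + 1] == 'T' and seq[index + 2] == 'G' and not in_cds:
--             is_uorf[frame] = True
--             uorf_codons += 1
--         elif is_uorf[frame]:
--             # the codon in the current fram is part of a uorf
--             uorf_codons += 1
--             # check to see if the current codon is a stop codon
--             if ((seq[index] == 'T' and seq[index + 1] == 'G' and seq[index + 2] == 'A') or (seq[index] == 'T' and seq[index + 1] == 'A' and seq[index + 2] == 'G')
--                     or (seq[index] == 'T' and seq[index + 1] == 'A' and seq[index + 2] == 'A')):
--                 is_uorf[frame] = False
--
--         index += 1
--
--         #check if the next codon will be in the cds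
--         if index + 2 >= cds_start_pos:
--             in_cds = True
--
--     return uorf_codons
-- ===== SOURCE B (Python) =====
-- def calculate_uorfs(seq, cds_start_pos):
--     # Scan each of the three reading frames independently and sum their counts.
--     n = len(seq)
--     total = 0
--     for f in range(3):
--         in_uorf = False
--         for p in range(f, n - 2, 3):
--             c0, c1, c2 = seq[p], seq[p + 1], seq[p + 2]
--             in_cds = p + 2 >= cds_start_pos
--             if c0 == 'A' and c1 == 'T' and c2 == 'G' and not in_cds:
--                 in_uorf = True
--                 total += 1
--             elif in_uorf:
--                 total += 1
--                 if (c0 == 'T' and c1 == 'G' and c2 == 'A') or (c0 == 'T' and c1 == 'A' and c2 == 'G') or (c0 == 'T' and c1 == 'A' and c2 == 'A'):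
--                     in_uorf = False
--     return total
-- ===== Notes on version B (the rewrite author's own statement) =====
-- stated objective: alternative
-- what changed: Replaces the single interleaved index loop with per-frame state and early termination by three independent per-frame codon scans (p = f, f+3, ...) whose counts are summed; the early-termination condition is proved result-neutral and dropped.
-- intended difference: When cds_start_pos <= 2 and the sequence starts with ATG, that ATG already lies inside the CDS but A still counts it and the uORF it opens (A only updates in_cds after the first index increment); B counts 0 uORF codons from it, the intended value since there is no upstream region. — e.g. on calculate_uorfs("ATG", 0): A returns 1, B returns 0
import Mathlib
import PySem

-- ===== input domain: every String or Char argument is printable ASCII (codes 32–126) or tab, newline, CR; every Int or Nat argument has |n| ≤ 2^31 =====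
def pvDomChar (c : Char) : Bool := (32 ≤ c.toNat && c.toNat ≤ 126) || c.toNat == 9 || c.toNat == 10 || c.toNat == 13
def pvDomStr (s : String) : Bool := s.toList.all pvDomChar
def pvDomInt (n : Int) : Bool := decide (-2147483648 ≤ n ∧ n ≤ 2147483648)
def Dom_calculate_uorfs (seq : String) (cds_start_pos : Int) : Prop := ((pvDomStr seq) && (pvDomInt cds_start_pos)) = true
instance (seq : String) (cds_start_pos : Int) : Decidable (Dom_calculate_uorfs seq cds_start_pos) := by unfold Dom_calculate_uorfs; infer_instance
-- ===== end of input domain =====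

-- B replaces A's interleaved single-index loop (three frame flags + early termination) by three
-- independent per-frame codon scans whose counts are summed: an alternative decomposition, same cost.

-- ===== PORT A =====
-- is_uorf[frame] is modelled by the three Booleans u0 u1 u2; reads/writes go through index % 3.
def pick3 (r : Nat) (u0 u1 u2 : Bool) : Bool := if r = 0 then u0 else if r = 1 then u1 else u2

def calcA_loop (chars : List Char) (cds : Int) (index : Nat) (in_cds u0 u1 u2 : Bool) (acc : Int) : Int :=
  if _h : index + 2 < chars.length ∧ (!in_cds || u0 || u1 || u2) = true then
    let c0 := chars.getD index ' '
    let c1 := chars.getD (index + 1) ' '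
    let c2 := chars.getD (index + 2) ' '
    let frame := index % 3
    let uf := pick3 frame u0 u1 u2
    let st :=
      if c0 = 'A' ∧ c1 = 'T' ∧ c2 = 'G' ∧ in_cds = false then (true, acc + 1)
      else if uf = true then
        (if (c0 = 'T' ∧ c1 = 'G' ∧ c2 = 'A') ∨ (c0 = 'T' ∧ c1 = 'A' ∧ c2 = 'G') ∨ (c0 = 'T' ∧ c1 = 'A' ∧ c2 = 'A')
         then false else true, acc + 1)
      else (uf, acc)
    let u0' := if frame = 0 then st.1 else u0
    let u1' := if frame = 1 then st.1 else u1
    let u2' := if frame = 2 then st.1 else u2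
    let index' := index + 1
    let in_cds' := if (index' : Int) + 2 ≥ cds then true else in_cds
    calcA_loop chars cds index' in_cds' u0' u1' u2' st.2
  else acc
termination_by chars.length - index

def calculate_uorfs (seq : String) (cds_start_pos : Int) : Int :=
  calcA_loop seq.toList cds_start_pos 0 false false false false 0

-- ===== PORT B =====
def calcB_frame (chars : List Char) (cds : Int) (p : Nat) (in_uorf : Bool) (acc : Int) : Int :=
  if _h : p + 2 < chars.length then
    let c0 := chars.getD p ' '
    let c1 := chars.getD (p + 1) ' '
    let c2 := chars.getD (p + 2) ' '
    let in_cds : Bool := decide (cds ≤ (p : Int) + 2)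
    if c0 = 'A' ∧ c1 = 'T' ∧ c2 = 'G' ∧ in_cds = false then
      calcB_frame chars cds (p + 3) true (acc + 1)
    else if in_uorf = true then
      calcB_frame chars cds (p + 3)
        (if (c0 = 'T' ∧ c1 = 'G' ∧ c2 = 'A') ∨ (c0 = 'T' ∧ c1 = 'A' ∧ c2 = 'G') ∨ (c0 = 'T' ∧ c1 = 'A' ∧ c2 = 'A')
         then false else true)
        (acc + 1)
    else
      calcB_frame chars cds (p + 3) in_uorf acc
  else acc
termination_by chars.length - p

def calculate_uorfs_alt (seq : String) (cds_start_pos : Int) : Int :=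
  calcB_frame seq.toList cds_start_pos 0 false 0
    + calcB_frame seq.toList cds_start_pos 1 false 0
    + calcB_frame seq.toList cds_start_pos 2 false 0

-- ===== PRECONDITION & SPEC =====
-- When the CDS starts at position ≤ 2, the ATG at position 0 already lies inside the CDS, yet A
-- still counts it and the uORF it opens (A only updates in_cds after the first index increment);
-- B counts no uORF codon there, which is the intended value since there is no upstream region.
def D_calculate_uorfs (seq : String) (cds_start_pos : Int) : Prop :=
  seq.toList.take 3 = ['A', 'T', 'G'] ∧ cds_start_pos ≤ 2
instance (seq : String) (cds_start_pos : Int) : Decidable (D_calculate_uorfs seq cds_start_pos) := by unfold D_calculate_uorfs; infer_instance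

def Spec_calculate_uorfs (seq : String) (cds_start_pos : Int) (out : Int) : Prop := ¬ D_calculate_uorfs seq cds_start_pos → out = calculate_uorfs_alt seq cds_start_pos
instance (seq : String) (cds_start_pos : Int) (out : Int) : Decidable (Spec_calculate_uorfs seq cds_start_pos out) := by unfold Spec_calculate_uorfs; infer_instance

def pvDiffWitness_calculate_uorfs : String × Int := ("ATG", 0)
def pvDiffWitnessOut_calculate_uorfs : Int × Int := (1, 0)

-- ===== CLAIM (what is proved, stated in full; the proofs are below) =====
def Claim_unchanged_calculate_uorfs : Prop := ∀ (seq : String) (cds_start_pos : Int), Dom_calculate_uorfs seq cds_start_pos → Spec_calculate_uorfs seq cds_start_pos (calculate_uorfs seq cds_start_pos)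
def Claim_changed_calculate_uorfs : Prop := Dom_calculate_uorfs (pvDiffWitness_calculate_uorfs.1) (pvDiffWitness_calculate_uorfs.2) ∧ D_calculate_uorfs (pvDiffWitness_calculate_uorfs.1) (pvDiffWitness_calculate_uorfs.2) ∧ calculate_uorfs (pvDiffWitness_calculate_uorfs.1) (pvDiffWitness_calculate_uorfs.2) = pvDiffWitnessOut_calculate_uorfs.1 ∧ calculate_uorfs_alt (pvDiffWitness_calculate_uorfs.1) (pvDiffWitness_calculate_uorfs.2) = pvDiffWitnessOut_calculate_uorfs.2 ∧ pvDiffWitnessOut_calculate_uorfs.1 ≠ pvDiffWitnessOut_calculate_uorfs.2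
def Claim_exact_calculate_uorfs : Prop := ∀ (seq : String) (cds_start_pos : Int), Dom_calculate_uorfs seq cds_start_pos → D_calculate_uorfs seq cds_start_pos → calculate_uorfs seq cds_start_pos ≠ calculate_uorfs_alt seq cds_start_pos

-- ===== LEMMAS AND PROOFS =====

-- frame-count of the frame containing position p, with the frame flags given per absolute frame
def W (chars : List Char) (cds : Int) (p : Nat) (u0 u1 u2 : Bool) : Int :=
  calcB_frame chars cds p (pick3 (p % 3) u0 u1 u2) 0

theorem calcB_terminal (chars : List Char) (cds : Int) (p : Nat) (s : Bool) (acc : Int)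
    (h : ¬ p + 2 < chars.length) : calcB_frame chars cds p s acc = acc := by
  rw [calcB_frame]; simp [h]

theorem calcB_acc (chars : List Char) (cds : Int) (p : Nat) (s : Bool) (acc : Int) :
    calcB_frame chars cds p s acc = acc + calcB_frame chars cds p s 0 := by
  by_cases h : p + 2 < chars.length
  · have IH := calcB_acc chars cds (p + 3)
    conv_lhs => rw [calcB_frame]
    conv_rhs => rw [calcB_frame]
    simp only [h, dite_true]
    split_ifs <;>
      first
      | ((rw [IH _ (acc + 1)]; conv_rhs => rw [IH _ (0 + 1)]); try ring)
      | ((rw [IH _ acc]); try ring)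
  · rw [calcB_terminal _ _ _ _ _ h, calcB_terminal _ _ _ _ _ h]; ring
termination_by chars.length - p

theorem calcB_step (chars : List Char) (cds : Int) (p : Nat) (s : Bool)
    (hlen : p + 2 < chars.length) :
    calcB_frame chars cds p s 0 =
      (if chars.getD p ' ' = 'A' ∧ chars.getD (p+1) ' ' = 'T' ∧ chars.getD (p+2) ' ' = 'G'
           ∧ decide (cds ≤ (p : Int) + 2) = false then
        1 + calcB_frame chars cds (p + 3) true 0
      else if s = true then
        1 + calcB_frame chars cds (p + 3)
          (if (chars.getD p ' ' = 'T' ∧ chars.getD (p+1) ' ' = 'G' ∧ chars.getD (p+2) ' ' = 'A')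
            ∨ (chars.getD p ' ' = 'T' ∧ chars.getD (p+1) ' ' = 'A' ∧ chars.getD (p+2) ' ' = 'G')
            ∨ (chars.getD p ' ' = 'T' ∧ chars.getD (p+1) ' ' = 'A' ∧ chars.getD (p+2) ' ' = 'A')
           then false else true) 0
      else calcB_frame chars cds (p + 3) s 0) := by
  rw [calcB_frame]
  simp only [hlen, dite_true]
  split_ifs <;> rw [calcB_acc] <;> ring

theorem calcB_dead (chars : List Char) (cds : Int) (p : Nat)
    (h2 : cds ≤ (p : Int) + 2) : calcB_frame chars cds p false 0 = 0 := by
  by_cases h : p + 2 < chars.length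
  · rw [calcB_frame]
    have hc : decide (cds ≤ (p : Int) + 2) = true := by
      simp only [decide_eq_true_eq]; exact h2
    simp only [h, dite_true, hc]
    rw [if_neg (by intro ⟨a, b, c, d⟩; simp at d), if_neg (by simp)]
    exact calcB_dead chars cds (p + 3) (by push_cast; omega)
  · exact calcB_terminal _ _ _ _ _ h
termination_by chars.length - p

set_option maxHeartbeats 1000000 in
theorem calcA_ge (chars : List Char) (cds : Int) (index : Nat) (in_cds u0 u1 u2 : Bool) (acc : Int) :
    acc ≤ calcA_loop chars cds index in_cds u0 u1 u2 acc := by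
  by_cases h : index + 2 < chars.length ∧ (!in_cds || u0 || u1 || u2) = true
  · obtain ⟨h1, h2⟩ := h
    rw [calcA_loop]
    simp only [h1, h2, and_true, dite_true]
    split_ifs <;>
      first
      | exact le_trans (by omega) (calcA_ge chars cds (index + 1) _ _ _ _ (acc + 1))
      | exact calcA_ge chars cds (index + 1) _ _ _ _ acc
  · rw [calcA_loop, dif_neg h]
termination_by chars.length - index

set_option maxHeartbeats 1000000 in
theorem calcA_main (chars : List Char) (cds : Int) (index : Nat) (in_cds u0 u1 u2 : Bool) (acc : Int)
    (hic : in_cds = decide (cds ≤ (index : Int) + 2)) :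
    calcA_loop chars cds index in_cds u0 u1 u2 acc
      = acc + W chars cds index u0 u1 u2 + W chars cds (index + 1) u0 u1 u2
          + W chars cds (index + 2) u0 u1 u2 := by
  by_cases hlen : index + 2 < chars.length
  · by_cases hrun : (!in_cds || u0 || u1 || u2) = true
    · -- loop body executes
      rw [calcA_loop]
      simp only [hlen, hrun, and_true, dite_true]
      have hmod : index % 3 = 0 ∧ (index+1) % 3 = 1 ∧ (index+2) % 3 = 2 ∧ (index+3) % 3 = 0
          ∨ index % 3 = 1 ∧ (index+1) % 3 = 2 ∧ (index+2) % 3 = 0 ∧ (index+3) % 3 = 1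
          ∨ index % 3 = 2 ∧ (index+1) % 3 = 0 ∧ (index+2) % 3 = 1 ∧ (index+3) % 3 = 2 := by
        omega
      have hic' : (if ((index + 1 : Nat) : Int) + 2 ≥ cds then true else in_cds)
          = decide (cds ≤ ((index + 1 : Nat) : Int) + 2) := by
        subst hic
        by_cases hcd : cds ≤ ((index : Int) + 1) + 2
        · simp only [ge_iff_le]; push_cast
          rw [if_pos (by omega)]
          exact (decide_eq_true (show cds ≤ (index : Int) + 1 + 2 by omega)).symm
        · simp only [ge_iff_le]; push_cast
          rw [if_neg (by omega)]
          rw [decide_eq_false (show ¬ cds ≤ (index : Int) + 2 by omega),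
            decide_eq_false (by push_cast at hcd ⊢; omega)]
      have hinB : (decide (cds ≤ (index : Int) + 2)) = in_cds := hic.symm
      have hBstep : ∀ s : Bool, calcB_frame chars cds index s 0 =
        (if chars.getD index ' ' = 'A' ∧ chars.getD (index+1) ' ' = 'T' ∧ chars.getD (index+2) ' ' = 'G' ∧ in_cds = false then
          1 + calcB_frame chars cds (index + 3) true 0
        else if s = true then
          1 + calcB_frame chars cds (index + 3)
            (if (chars.getD index ' ' = 'T' ∧ chars.getD (index+1) ' ' = 'G' ∧ chars.getD (index+2) ' ' = 'A')
              ∨ (chars.getD index ' ' = 'T' ∧ chars.getD (index+1) ' ' = 'A' ∧ chars.getD (index+2) ' ' = 'G')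
              ∨ (chars.getD index ' ' = 'T' ∧ chars.getD (index+1) ' ' = 'A' ∧ chars.getD (index+2) ' ' = 'A')
             then false else true) 0
        else calcB_frame chars cds (index + 3) s 0) := by
        intro s
        rw [calcB_step chars cds index s hlen, hinB]
      have IH := calcA_main chars cds (index + 1)
        (if ((index + 1 : Nat) : Int) + 2 ≥ cds then true else in_cds)
      rw [IH _ _ _ _ hic']
      unfold W
      rcases hmod with ⟨h0, h1, h2, h3⟩ | ⟨h0, h1, h2, h3⟩ | ⟨h0, h1, h2, h3⟩ <;>
        · simp only [h0, h1, h2, h3, pick3, reduceIte]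
          rw [hBstep]
          clear hBstep IH hrun hic hinB hic'
          split_ifs <;> simp_all <;> ring
    · -- early termination: in_cds true and all frame flags false
      rw [calcA_loop]
      rw [dif_neg (by simp_all)]
      have hin : in_cds = true := by
        by_contra hf
        simp only [Bool.not_eq_true] at hf
        simp [hf] at hrun
      have hu0 : u0 = false := by by_contra hf; simp only [Bool.not_eq_false] at hf; simp [hf] at hrun
      have hu1 : u1 = false := by by_contra hf; simp only [Bool.not_eq_false] at hf; simp [hf] at hrun
      have hu2 : u2 = false := by by_contra hf; simp only [Bool.not_eq_false] at hf; simp [hf] at hrun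
      rw [hin] at hic
      have hcd : cds ≤ (index : Int) + 2 := by
        have := hic.symm; simpa using this
      have hz : ∀ q : Nat, index ≤ q → calcB_frame chars cds q false 0 = 0 := by
        intro q hq
        exact calcB_dead chars cds q (by push_cast; omega)
      subst hu0 hu1 hu2
      unfold W
      have p0 : pick3 (index % 3) false false false = false := by unfold pick3; split_ifs <;> rfl
      have p1 : pick3 ((index+1) % 3) false false false = false := by unfold pick3; split_ifs <;> rfl
      have p2 : pick3 ((index+2) % 3) false false false = false := by unfold pick3; split_ifs <;> rfl
      rw [p0, p1, p2, hz index le_rfl, hz (index+1) (by omega), hz (index+2) (by omega)]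
      ring
  · -- all scans terminate immediately
    rw [calcA_loop]
    rw [dif_neg (by intro ⟨a, _⟩; exact hlen a)]
    unfold W
    rw [calcB_terminal _ _ _ _ _ hlen,
      calcB_terminal _ _ _ _ _ (by omega),
      calcB_terminal _ _ _ _ _ (by omega)]
    ring
termination_by chars.length - index

theorem take3_ATG (l : List Char) :
    l.take 3 = ['A', 'T', 'G'] ↔
      2 < l.length ∧ l.getD 0 ' ' = 'A' ∧ l.getD 1 ' ' = 'T' ∧ l.getD 2 ' ' = 'G' := by
  rcases l with _ | ⟨a, _ | ⟨b, _ | ⟨c, t⟩⟩⟩ <;> simp [List.getD] <;> omega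

-- ===== VERDICT (by name: the statement is the Claim_ definition above) =====
theorem calculate_uorfs_spec : Claim_unchanged_calculate_uorfs := by
  intro seq cds _ hnd
  unfold calculate_uorfs calculate_uorfs_alt
  unfold D_calculate_uorfs at hnd
  set chars := seq.toList with hch
  by_cases hlen : 0 + 2 < chars.length
  · -- one step of A at index 0, then calcA_main from index 1
    rw [calcA_loop]
    rw [dif_pos (by exact ⟨hlen, by simp⟩)]
    simp only [pick3, reduceIte, Nat.zero_mod]
    rw [calcA_main chars cds 1 _ _ _ _ _ (by
      by_cases hcd : cds ≤ ((1 : Nat) : Int) + 2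
      · rw [if_pos (by push_cast at hcd ⊢; omega), decide_eq_true hcd]
      · rw [if_neg (by push_cast at hcd ⊢; omega), decide_eq_false hcd])]
    unfold W pick3
    norm_num
    by_cases hC : chars[0]?.getD ' ' = 'A' ∧ chars[1]?.getD ' ' = 'T' ∧ chars[2]?.getD ' ' = 'G'
    · have hcd : ¬ cds ≤ 2 := by
        intro hc
        refine hnd ⟨(take3_ATG chars).2 ⟨by omega, ?_, ?_, ?_⟩, hc⟩ <;>
          simp [List.getD_eq_getElem?_getD, hC.1, hC.2.1, hC.2.2]
      have hB0 : calcB_frame chars cds 0 false 0 = 1 + calcB_frame chars cds 3 true 0 := by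
        rw [calcB_step chars cds 0 false hlen]
        rw [if_pos ⟨by simp [List.getD_eq_getElem?_getD, hC.1],
          by simpa [List.getD_eq_getElem?_getD] using hC.2.1,
          by simpa [List.getD_eq_getElem?_getD] using hC.2.2,
          by rw [decide_eq_false]; push_cast; omega⟩]
      rw [hB0]
      simp only [hC, and_self, reduceIte, if_pos]
      norm_num
      ring
    · have hB0 : calcB_frame chars cds 0 false 0 = calcB_frame chars cds 3 false 0 := by
        rw [calcB_step chars cds 0 false hlen]
        rw [if_neg (by
          intro ⟨a, b, c, _⟩
          exact hC ⟨by simpa [List.getD_eq_getElem?_getD] using a,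
            by simpa [List.getD_eq_getElem?_getD] using b,
            by simpa [List.getD_eq_getElem?_getD] using c⟩)]
        rw [if_neg (by simp)]
      rw [hB0]
      simp only [hC, reduceIte, if_neg]
      norm_num
      ring
  · -- sequence too short: both sides are 0
    rw [calcA_loop, dif_neg (by intro ⟨a, _⟩; exact hlen a)]
    rw [calcB_terminal _ _ _ _ _ hlen,
      calcB_terminal _ _ _ _ _ (by omega),
      calcB_terminal _ _ _ _ _ (by omega)]
    ring

theorem calculate_uorfs_changed : Claim_changed_calculate_uorfs := by
  unfold Claim_changed_calculate_uorfs pvDiffWitness_calculate_uorfs pvDiffWitnessOut_calculate_uorfs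
  refine ⟨by decide, by decide, ?_, ?_, by decide⟩
  · show calculate_uorfs "ATG" 0 = 1
    unfold calculate_uorfs
    rw [calcA_loop]
    rw [dif_pos (by exact ⟨by decide, by decide⟩)]
    norm_num [pick3]
    rw [if_pos (by decide)]
    rw [calcA_loop, dif_neg (by intro h; exact absurd h.1 (by decide))]
  · show calculate_uorfs_alt "ATG" 0 = 0
    unfold calculate_uorfs_alt
    rw [calcB_dead _ _ _ (by decide), calcB_dead _ _ _ (by decide), calcB_dead _ _ _ (by decide)]
    ring

theorem calculate_uorfs_tight : Claim_exact_calculate_uorfs := by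
  intro seq cds _ hd
  obtain ⟨htake, hcd⟩ := hd
  obtain ⟨hlen, hA, hT, hG⟩ := (take3_ATG seq.toList).1 htake
  have hB : calculate_uorfs_alt seq cds = 0 := by
    unfold calculate_uorfs_alt
    rw [calcB_dead _ _ _ (by push_cast; omega),
      calcB_dead _ _ _ (by push_cast; omega),
      calcB_dead _ _ _ (by push_cast; omega)]
    ring
  have hAge : 1 ≤ calculate_uorfs seq cds := by
    unfold calculate_uorfs
    have hlen' : 0 + 2 < seq.toList.length := by omega
    rw [calcA_loop]
    rw [dif_pos (by exact ⟨hlen', by simp⟩)]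
    simp only [pick3, Nat.zero_mod, reduceIte]
    refine le_trans ?_ (calcA_ge _ _ _ _ _ _ _ _)
    rw [if_pos ⟨hA, hT, hG, trivial⟩]
    norm_num
  rw [hB]
  omega
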